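-- pv_equiv track=rewrite | github.com/Gaurund/Python_10_4992 | 13/main.py | warm_days
-- ===== SOURCE A (Python) =====
-- def warm_days(total_days_list):
--     count = 0
--     warm_days_list = [count]
--     for i in range(len(total_days_list)):
--         if total_days_list[i] > 0:
--             warm_days_list[count] += 1
--         elif total_days_list[i] <= 0 and warm_days_list[count] != 0:
--             count += 1
--             warm_days_list.append(0)
--     warm_days_list.sort()
--     return warm_days_list[count]
-- ===== SOURCE B (Python) =====
-- def warm_days(total_days_list):
--     best = 0
--     cur = 0
--     for d in total_days_list:
--         cur = cur + 1 if d > 0 else 0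
--         if cur > best:
--             best = cur
--     return best
-- ===== Notes on version B (the rewrite author's own statement) =====
-- stated objective: faster
-- what changed: A records every run length in a list it then sorts to pick the maximum; B keeps only the current run length and the running maximum in one pass with no list and no sort.
import Mathlib
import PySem

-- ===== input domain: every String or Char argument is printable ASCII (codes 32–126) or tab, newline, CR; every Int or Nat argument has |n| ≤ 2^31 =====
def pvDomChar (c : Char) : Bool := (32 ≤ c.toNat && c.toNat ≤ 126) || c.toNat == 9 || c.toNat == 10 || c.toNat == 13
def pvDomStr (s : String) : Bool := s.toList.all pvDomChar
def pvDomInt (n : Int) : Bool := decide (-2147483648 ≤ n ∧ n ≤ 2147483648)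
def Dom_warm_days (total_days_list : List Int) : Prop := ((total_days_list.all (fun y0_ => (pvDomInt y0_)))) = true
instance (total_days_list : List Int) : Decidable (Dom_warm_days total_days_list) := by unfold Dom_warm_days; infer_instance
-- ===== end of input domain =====

-- B replaces A's run-length list + sort by a single pass tracking the current run length and the running maximum (faster: O(n) vs O(n log n)).


-- ===== PORT A =====
-- A's loop body: index i, state (count, warm_days_list)
def warmDaysStep (xs : List Int) (st : Int × List Int) (i : Int) : Int × List Int :=
  if PySem.List.pyGetD xs i 0 > 0 then
    (st.1, PySem.List.pySetD st.2 st.1 (PySem.List.pyGetD st.2 st.1 0 + 1))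
  else if PySem.List.pyGetD xs i 0 ≤ 0 ∧ PySem.List.pyGetD st.2 st.1 0 ≠ 0 then
    (st.1 + 1, st.2 ++ [0])
  else st

def warm_days (total_days_list : List Int) : Int :=
  let st := (PySem.List.pyRange 0 total_days_list.length 1).foldl
    (warmDaysStep total_days_list) (0, [(0 : Int)])
  PySem.List.pyGetD (PySem.List.sorted st.2 (fun x => x) false) st.1 0

-- ===== PORT B =====
-- B's loop body: day d, state (best, cur)
def warmDaysAltStep (p : Int × Int) (d : Int) : Int × Int :=
  let cur := if d > 0 then p.2 + 1 else 0
  (if cur > p.1 then cur else p.1, cur)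

def warm_days_alt (total_days_list : List Int) : Int :=
  (total_days_list.foldl warmDaysAltStep (0, 0)).1

-- ===== PRECONDITION & SPEC =====
def Spec_warm_days (total_days_list : List Int) (out : Int) : Prop := out = warm_days_alt total_days_list
instance (total_days_list : List Int) (out : Int) : Decidable (Spec_warm_days total_days_list out) := by unfold Spec_warm_days; infer_instance

-- ===== CLAIM (what is proved, stated in full; the proofs are below) =====
def Claim_equal_warm_days : Prop := ∀ (total_days_list : List Int), Dom_warm_days total_days_list → Spec_warm_days total_days_list (warm_days total_days_list)

-- ===== LEMMAS AND PROOFS =====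

-- Coupled-loop invariant: A's state is (rs.length, rs ++ [cur]) where rs are the closed
-- runs (all positive) and cur the current run; B's state is (max of all run lengths, cur).
theorem warm_days_loops (xs : List Int) : ∀ (rs : List Int) (cur : Int), 0 ≤ cur → (∀ r ∈ rs, 0 < r) →
    ∃ rs' cur',
      xs.foldl (fun st d => warmDaysStep [d] st 0) ((rs.length : Int), rs ++ [cur]) =
        ((rs'.length : Int), rs' ++ [cur']) ∧
      0 ≤ cur' ∧ (∀ r ∈ rs', 0 < r) ∧
      xs.foldl warmDaysAltStep ((rs ++ [cur]).foldl max 0, cur) =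
        ((rs' ++ [cur']).foldl max 0, cur') := by
  induction xs with
  | nil => intro rs cur hc hpos; exact ⟨rs, cur, rfl, hc, hpos, rfl⟩
  | cons d rest ih =>
    intro rs cur hc hpos
    by_cases hd : d > 0
    · -- positive day: current run grows
      have hA : warmDaysStep [d] ((rs.length : Int), rs ++ [cur]) 0 =
          ((rs.length : Int), rs ++ [cur + 1]) := by
        simp [warmDaysStep, PySem.List.pyGetD_zero_cons, hd]
      have hB : warmDaysAltStep ((rs ++ [cur]).foldl max 0, cur) d =
          ((rs ++ [cur + 1]).foldl max 0, cur + 1) := by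
        have h1 : (rs ++ [cur]).foldl max 0 = max (rs.foldl max 0) cur := by
          simp [List.foldl_append]
        have h2 : (rs ++ [cur + 1]).foldl max 0 = max (rs.foldl max 0) (cur + 1) := by
          simp [List.foldl_append]
        have hle : cur ≤ (rs ++ [cur]).foldl max 0 := by rw [h1]; exact le_max_right _ _
        simp only [warmDaysAltStep, hd, if_true, h1, h2]
        split_ifs <;> rw [Prod.mk.injEq] <;> exact ⟨by omega, by omega⟩
      simp only [List.foldl_cons, hA, hB]
      exact ih rs (cur + 1) (by omega) hpos
    · -- non-positive day
      have hget : PySem.List.pyGetD (rs ++ [cur]) ((rs.length : Int)) 0 = cur := by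
        simp [PySem.List.pyGetD_natCast]
      by_cases hz : cur = 0
      · -- current run already empty: A's state unchanged
        have hA : warmDaysStep [d] ((rs.length : Int), rs ++ [cur]) 0 =
            ((rs.length : Int), rs ++ [cur]) := by
          simp [warmDaysStep, PySem.List.pyGetD_zero_cons, hd, hz]
        have hB : warmDaysAltStep ((rs ++ [cur]).foldl max 0, cur) d =
            ((rs ++ [cur]).foldl max 0, cur) := by
          have h0 : 0 ≤ (rs ++ [cur]).foldl max 0 := (PySem.List.le_foldl_max _ _).1
          simp only [warmDaysAltStep, hd, if_false]
          split_ifs <;> rw [Prod.mk.injEq] <;> exact ⟨by omega, by omega⟩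
        simp only [List.foldl_cons, hA, hB]
        exact ih rs cur hc hpos
      · -- close the current run
        have hA : warmDaysStep [d] ((rs.length : Int), rs ++ [cur]) 0 =
            (((rs ++ [cur]).length : Int), (rs ++ [cur]) ++ [0]) := by
          simp [warmDaysStep, PySem.List.pyGetD_zero_cons, hd, hget, hz]
        have hB : warmDaysAltStep ((rs ++ [cur]).foldl max 0, cur) d =
            (((rs ++ [cur]) ++ [0]).foldl max 0, 0) := by
          have h0 : 0 ≤ (rs ++ [cur]).foldl max 0 := (PySem.List.le_foldl_max _ _).1
          have h2 : ((rs ++ [cur]) ++ [0]).foldl max 0 = max ((rs ++ [cur]).foldl max 0) 0 := by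
            simp [List.foldl_append]
          simp only [warmDaysAltStep, hd, if_false, h2]
          split_ifs <;> rw [Prod.mk.injEq] <;> exact ⟨by omega, by omega⟩
        simp only [List.foldl_cons, hA, hB]
        exact ih (rs ++ [cur]) 0 le_rfl (by
          intro r hr
          rcases List.mem_append.mp hr with h | h
          · exact hpos r h
          · simp only [List.mem_singleton] at h; omega)

-- A's fold over range(len(xs)) with xs[i] inside is the fold over xs itself.
theorem warm_days_fold_range (xs : List Int) (st : Int × List Int) :
    (PySem.List.pyRange 0 xs.length 1).foldl (warmDaysStep xs) st =
      xs.foldl (fun st d => warmDaysStep [d] st 0) st := by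
  have h : warmDaysStep xs =
      (fun st i => (fun st v => warmDaysStep [v] st 0) st (PySem.List.pyGetD xs i 0)) := by
    funext st i
    simp [warmDaysStep, PySem.List.pyGetD_zero_cons]
  rw [h]
  exact PySem.List.foldl_pyRange_zero_pyGetD xs 0 (fun st v => warmDaysStep [v] st 0) st

-- In a ≤-sorted nonempty list, the element at the last index is the foldl-max over 0
-- (all elements being ≥ 0).
theorem sorted_last_is_max (wl : List Int) (hne : wl ≠ []) (h0 : ∀ y ∈ wl, 0 ≤ y) :
    PySem.List.pyGetD (PySem.List.sorted wl (fun x => x) false) ((wl.length : Int) - 1) 0 =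
      wl.foldl max 0 := by
  have hlen : 0 < wl.length := List.length_pos_iff.mpr hne
  set s := PySem.List.sorted wl (fun x => x) false with hs
  have hperm : s.Perm wl := PySem.List.sorted_perm wl _ _
  have hpw : s.Pairwise (· ≤ ·) := by
    simpa using PySem.List.sorted_pairwise wl (fun x => x) (κ := Int)
  have hslen : s.length = wl.length := hperm.length_eq
  have hcast : ((wl.length : Int) - 1) = ((wl.length - 1 : Nat) : Int) := by omega
  rw [hcast, PySem.List.pyGetD_natCast]
  have hidx : wl.length - 1 < s.length := by omega
  have hgetD : s.getD (wl.length - 1) 0 = s[wl.length - 1] := List.getD_eq_getElem s 0 hidx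
  rw [hgetD]
  -- the last element of the sorted list bounds every element
  have hmaxel : ∀ y ∈ s, y ≤ s[wl.length - 1] := by
    intro y hy
    obtain ⟨i, hi, hyi⟩ := List.mem_iff_getElem.mp hy
    rcases eq_or_lt_of_le (Nat.le_of_lt_succ (by omega) : i ≤ wl.length - 1) with h1 | h1
    · subst h1; omega
    · have := (List.pairwise_iff_getElem.mp hpw) i (wl.length - 1) hi hidx h1
      omega
  have hmem : s[wl.length - 1] ∈ wl := hperm.mem_iff.mp (List.getElem_mem hidx)
  have hfold := PySem.List.le_foldl_max wl 0
  have hub : s[wl.length - 1] ≤ wl.foldl max 0 := hfold.2 _ hmem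
  have hlb : wl.foldl max 0 ≤ s[wl.length - 1] := by
    rcases PySem.List.foldl_max_mem wl 0 with h | h
    · rw [h]; exact h0 _ hmem
    · exact hmaxel _ (hperm.mem_iff.mpr h)
  omega

-- ===== VERDICT (by name: the statement is the Claim_ definition above) =====
theorem warm_days_spec : Claim_equal_warm_days := by
  intro xs _
  unfold Spec_warm_days warm_days warm_days_alt
  rw [warm_days_fold_range]
  obtain ⟨rs', cur', hA, hc, hpos, hB⟩ := warm_days_loops xs [] 0 le_rfl (by simp)
  simp only [List.length_nil, Nat.cast_zero, List.nil_append, List.foldl_cons, List.foldl_nil,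
    max_self] at hA hB
  simp only [hA, hB]
  have hlen : ((rs' ++ [cur']).length : Int) - 1 = (rs'.length : Int) := by
    simp
  rw [← hlen, sorted_last_is_max]
  · simp
  · intro y hy
    rcases List.mem_append.mp hy with h | h
    · exact le_of_lt (hpos y h)
    · simp only [List.mem_singleton] at h; omega
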